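-- pv_equiv track=rewrite | github.com/piotrhelm/NESTFUL | data_v2/executable_functions/py_code_file_1307.py | pair_vars_with_rotated_list
-- ===== SOURCE A (Python) =====
-- from typing import List, Tuple
--
-- def pair_vars_with_rotated_list(lst: List[int]) -> List[Tuple[int, int]]:
--
--     """Creates a list of tuples, where each tuple contains a variable and its rotated version.
--
--     Args:
--
--         lst: A list of variables.
--
--     Returns:
--
--         A list of tuples.
--
--     """
--
--     if not lst or len(lst) == 1:
--
--         return []
--
--     result = []
--
--     for idx, var in enumerate(lst):
--
--         if idx == len(lst) - 1:
--
--             rotated_var = lst[0]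
--
--         else:
--
--             rotated_var = lst[idx + 1]
--
--         result.append((var, rotated_var))
--
--     return result
-- ===== SOURCE B (Python) =====
-- from typing import List, Tuple
--
-- def pair_vars_with_rotated_list(lst: List[int]) -> List[Tuple[int, int]]:
--     if not lst or len(lst) == 1:
--         return []
--     rot = lst[1:] + lst[:1]
--     return list(zip(lst, rot))
-- ===== Notes on version B (the rewrite author's own statement) =====
-- stated objective: idiomatic
-- what changed: Instead of an enumerate loop with a conditional wrap-around index for each element, B builds the rotation lst[1:]+lst[:1] once and zips the list against it.
import Mathlib
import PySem

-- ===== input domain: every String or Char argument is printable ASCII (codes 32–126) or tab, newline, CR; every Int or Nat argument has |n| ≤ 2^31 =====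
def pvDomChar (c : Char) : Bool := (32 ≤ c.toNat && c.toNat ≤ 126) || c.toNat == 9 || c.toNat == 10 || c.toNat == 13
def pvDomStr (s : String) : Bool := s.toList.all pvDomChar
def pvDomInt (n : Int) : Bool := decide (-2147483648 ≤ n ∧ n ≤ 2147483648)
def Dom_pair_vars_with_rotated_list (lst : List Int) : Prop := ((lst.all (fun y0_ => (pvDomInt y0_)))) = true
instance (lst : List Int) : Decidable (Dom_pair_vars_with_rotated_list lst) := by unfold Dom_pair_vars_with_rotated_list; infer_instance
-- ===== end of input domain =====

-- ===== PORT A =====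
-- A: enumerate loop; the rotated neighbor is lst[idx+1], or lst[0] at the last index.
def pair_vars_with_rotated_list (lst : List Int) : List (Int × Int) :=
  if lst = [] ∨ (lst.length : Int) = 1 then []
  else
    (PySem.List.enumerate lst 0).foldl
      (fun result p =>
        let rotated_var : Int :=
          if p.1 = (lst.length : Int) - 1 then PySem.List.pyGetD lst 0 0
          else PySem.List.pyGetD lst (p.1 + 1) 0
        result ++ [(p.2, rotated_var)]) []

-- ===== PORT B =====
-- B (idiomatic): zip the list against its explicit rotation lst[1:] + lst[:1].
def pair_vars_with_rotated_list_alt (lst : List Int) : List (Int × Int) :=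
  if lst = [] ∨ (lst.length : Int) = 1 then []
  else
    let rot := PySem.List.slice lst (some 1) none ++ PySem.List.slice lst none (some 1)
    lst.zip rot

-- ===== PRECONDITION & SPEC =====
def Spec_pair_vars_with_rotated_list (lst : List Int) (out : List (Int × Int)) : Prop := out = pair_vars_with_rotated_list_alt lst
instance (lst : List Int) (out : List (Int × Int)) : Decidable (Spec_pair_vars_with_rotated_list lst out) := by unfold Spec_pair_vars_with_rotated_list; infer_instance

-- ===== CLAIM (what is proved, stated in full; the proofs are below) =====
def Claim_equal_pair_vars_with_rotated_list : Prop := ∀ (lst : List Int), Dom_pair_vars_with_rotated_list lst → Spec_pair_vars_with_rotated_list lst (pair_vars_with_rotated_list lst)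

-- ===== LEMMAS AND PROOFS =====

theorem pvrl_main (lst : List Int) (h : ¬(lst = [] ∨ (lst.length : Int) = 1)) :
    (PySem.List.enumerate lst 0).foldl
      (fun result (p : Int × Int) =>
        let rotated_var : Int :=
          if p.1 = (lst.length : Int) - 1 then PySem.List.pyGetD lst 0 0
          else PySem.List.pyGetD lst (p.1 + 1) 0
        result ++ [(p.2, rotated_var)]) []
    = lst.zip (PySem.List.slice lst (some 1) none ++ PySem.List.slice lst none (some 1)) := by
  push Not at h
  obtain ⟨hne, hlen⟩ := h
  have hn : 2 ≤ lst.length := by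
    rcases lst with _ | ⟨a, _ | ⟨b, t⟩⟩ <;> simp_all
  rw [PySem.List.foldl_append_singleton_eq_map,
      show (some (1:Int)) = some ((1:Nat):Int) from rfl,
      PySem.List.slice_from_natCast, PySem.List.slice_to_natCast]
  simp only [List.nil_append]
  apply List.ext_getElem
  · simp [PySem.List.length_enumerate]
    omega
  · intro i h1 h2
    simp only [List.getElem_map, PySem.List.getElem_enumerate, List.getElem_zip]
    have hi : i < lst.length := by simpa [PySem.List.length_enumerate] using h1
    simp only [Int.zero_add]
    rw [Prod.mk.injEq]
    refine ⟨rfl, ?_⟩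
    by_cases hlast : i = lst.length - 1
    · have hci : ((i : Int)) = (lst.length : Int) - 1 := by omega
      rw [if_pos hci]
      have hd : (lst.drop 1).length = lst.length - 1 := by simp
      rw [List.getElem_append_right (by omega)]
      simp [PySem.List.pyGetD_zero]
      rcases lst with _ | ⟨a, t⟩
      · simp at hn
      · simp [hlast]
    · have hne2 : ((i : Int)) ≠ (lst.length : Int) - 1 := by omega
      rw [if_neg hne2]
      have hcast : ((i : Int)) + 1 = ((i + 1 : Nat) : Int) := by push_cast; ring
      rw [hcast, PySem.List.pyGetD_natCast]
      rw [List.getElem_append_left (by simp; omega)]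
      have hi1 : i + 1 < lst.length := by omega
      simp [List.getD_eq_getElem?_getD, hi1]

-- ===== VERDICT (by name: the statement is the Claim_ definition above) =====
theorem pair_vars_with_rotated_list_spec : Claim_equal_pair_vars_with_rotated_list := by
  intro lst _
  unfold Spec_pair_vars_with_rotated_list pair_vars_with_rotated_list pair_vars_with_rotated_list_alt
  by_cases h : lst = [] ∨ (lst.length : Int) = 1
  · rw [if_pos h, if_pos h]
  · rw [if_neg h, if_neg h]
    exact pvrl_main lst h
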